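-- pv_equiv track=rewrite | github.com/onyonkaclifford/computer-games-probable-solutions | wordscapes.py | get_wordlist_of_all_possible_words
-- ===== SOURCE A (Python) =====
-- def get_wordlist_of_all_possible_words(characters, length_of_words):
--     """Get a list of all words, real and fabricated, of a certain length from the list of characters given
--
--     >>> get_wordlist_of_all_possible_words("filyar", 2)
--     ['fi', 'fl', 'fy', 'fa', 'fr', 'if', 'il', 'iy', 'ia', 'ir', 'lf', 'li', 'ly', 'la', 'lr', 'yf', 'yi', 'yl', 'ya', \
-- 'yr', 'af', 'ai', 'al', 'ay', 'ar', 'rf', 'ri', 'rl', 'ry', 'ra']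
--
--     :param characters: string of scrambled characters
--     :param length_of_words: length of words to be formed
--     :return: list of words
--     """
--     characters = characters.lower()
--
--     if length_of_words == 0:
--         return []
--
--     wordlist = [i for i in characters]
--     num_of_occurrences = {}
--     current_length_of_words = 1
--
--     for i in characters:
--         if i not in num_of_occurrences:
--             num_of_occurrences[i] = 1
--         else:
--             num_of_occurrences[i] += 1
--
--     while current_length_of_words < length_of_words:
--         replacement_wordlist = []
--
--         for i, value in enumerate(wordlist):
--             [
--                 replacement_wordlist.append(f"{wordlist[i]}{j}") for j in characters
--                 if value.count(j) < num_of_occurrences[j] and f"{wordlist[i]}{j}" not in replacement_wordlist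
--             ]
--
--         wordlist = replacement_wordlist
--         current_length_of_words += 1
--
--     return wordlist
-- ===== SOURCE B (Python) =====
-- def get_wordlist_of_all_possible_words(characters, length_of_words):
--     """Recursive depth-first generation: extend the prefix by each DISTINCT
--     available character (multiplicity bound), so no per-level wordlists and no
--     dedup membership scans are needed."""
--     characters = characters.lower()
--
--     if length_of_words <= 0:
--         return []
--
--     counts = {}
--     for c in characters:
--         counts[c] = counts.get(c, 0) + 1
--
--     def build(prefix, remaining):
--         if remaining == 0:
--             return [prefix]
--         return [w for c in counts if prefix.count(c) < counts[c]
--                 for w in build(prefix + c, remaining - 1)]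
--
--     return build("", length_of_words)
-- ===== Notes on version B (the rewrite author's own statement) =====
-- stated objective: alternative
-- what changed: A's level-by-level (BFS) rebuild of a wordlist with per-candidate 'not in replacement_wordlist' scans is replaced by a recursive depth-first generation that extends each prefix by each distinct available character under its multiplicity bound, so no per-level lists and no dedup membership scans exist at all.
-- intended difference: For length_of_words = 1 on a string with a repeated character A returns the raw character list with duplicates (its dedup only runs from the second level on), while B lists each distinct word once, which is what the function's purpose and A's own behaviour at every other length intend. — e.g. on get_wordlist_of_all_possible_words("aa", 1): A returns ["a", "a"], B returns ["a"]
-- outside the precondition, e.g. on get_wordlist_of_all_possible_words('ab', -1): A returns ['a', 'b'], B returns []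
import Mathlib
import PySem

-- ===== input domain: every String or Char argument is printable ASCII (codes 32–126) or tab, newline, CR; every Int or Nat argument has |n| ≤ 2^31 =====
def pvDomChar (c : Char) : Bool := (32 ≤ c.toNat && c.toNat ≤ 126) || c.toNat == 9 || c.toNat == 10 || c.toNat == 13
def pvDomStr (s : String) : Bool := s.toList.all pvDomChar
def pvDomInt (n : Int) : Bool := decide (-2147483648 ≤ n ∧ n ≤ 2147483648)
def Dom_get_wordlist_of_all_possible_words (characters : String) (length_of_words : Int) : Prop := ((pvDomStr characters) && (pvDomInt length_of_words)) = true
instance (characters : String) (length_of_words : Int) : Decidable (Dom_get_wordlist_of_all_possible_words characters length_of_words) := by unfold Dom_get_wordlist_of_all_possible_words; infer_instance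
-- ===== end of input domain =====

-- B replaces A's level-by-level (BFS) construction with per-level dedup scans by a
-- recursive depth-first generation: each prefix is extended by each distinct
-- available character, so no per-level wordlists and no membership scans exist.
-- The equivalence claimed is about the return value on every input with
-- 0 ≤ length_of_words, outside D_ (length 1 with a repeated character).

-- ===== PORT A =====
-- num_of_occurrences: 'if i not in …: …[i] = 1 else: …[i] += 1'
def pvOccA (cs : List Char) : PySem.Dict Char Int :=
  cs.foldl (fun d i => if d.contains i = false then d.insert i 1 else d.modify i 0 (· + 1)) PySem.Dict.empty

-- the inner list comprehension: appends f"{wordlist[i]}{j}" (= value ++ j; wordlist is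
-- not mutated during the for) for j in characters, under A's two conditions
-- (num_of_occurrences[j]: j is always a present key, so getD is exact)
def pvInnerA (cs : List Char) (occ : PySem.Dict Char Int) (value : String) (r : List String) : List String :=
  cs.foldl (fun r j =>
    if (PySem.Str.count value (String.ofList [j]) : Int) < occ.getD j 0 ∧ (value ++ String.ofList [j]) ∉ r
    then r ++ [value ++ String.ofList [j]] else r) r

-- one pass of the while-loop body: replacement_wordlist = [], then the for over enumerate(wordlist)
def pvStepA (cs : List Char) (occ : PySem.Dict Char Int) (wl : List String) : List String :=
  wl.foldl (fun racc value => pvInnerA cs occ value racc) []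

-- 'while current_length_of_words < length_of_words', current starting at 1: runs
-- (length_of_words - 1).toNat times
def pvIterA (cs : List Char) (occ : PySem.Dict Char Int) : List String → Nat → List String
  | wl, 0 => wl
  | wl, n+1 => pvIterA cs occ (pvStepA cs occ wl) n

def get_wordlist_of_all_possible_words (characters : String) (length_of_words : Int) : List String :=
  let cs := (PySem.Str.lower characters).toList
  if length_of_words = 0 then []
  else
    pvIterA cs (pvOccA cs) (cs.map (fun i => String.ofList [i])) (length_of_words - 1).toNat

-- ===== PORT B =====
-- counts[c] = counts.get(c, 0) + 1
def pvCountsB (cs : List Char) : PySem.Dict Char Int :=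
  cs.foldl (fun d c => d.insert c (d.getD c 0 + 1)) PySem.Dict.empty

-- build(prefix, remaining): the comprehension
-- [w for c in counts if prefix.count(c) < counts[c] for w in build(prefix + c, remaining - 1)];
-- remaining counts down from length_of_words (≥ 1 at the call) to 0
def pvBuildB (counts : PySem.Dict Char Int) : String → Nat → List String
  | pre, 0 => [pre]
  | pre, n+1 =>
    (counts.keys.filter (fun c => (PySem.Str.count pre (String.ofList [c]) : Int) < counts.getD c 0)).flatMap
      (fun c => pvBuildB counts (pre ++ String.ofList [c]) n)

def get_wordlist_of_all_possible_words_alt (characters : String) (length_of_words : Int) : List String :=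
  let cs := (PySem.Str.lower characters).toList
  if length_of_words ≤ 0 then []
  else pvBuildB (pvCountsB cs) "" length_of_words.toNat

-- ===== PRECONDITION & SPEC =====
-- Pre_ excludes negative lengths: no word list of negative length is specifiable, A's
-- value there (the raw length-1 character list, its while-loop never running) and B's []
-- are both mere defaults for a request nobody would specify.
def Pre_get_wordlist_of_all_possible_words (characters : String) (length_of_words : Int) : Prop :=
  0 ≤ length_of_words
instance (characters : String) (length_of_words : Int) : Decidable (Pre_get_wordlist_of_all_possible_words characters length_of_words) := by unfold Pre_get_wordlist_of_all_possible_words; infer_instance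
def pvWitness_get_wordlist_of_all_possible_words : String × Int := ("filyar", 2)

-- D_: for length_of_words = 1 with a repeated character, A returns the raw character
-- list with its duplicates (a word listed twice), because its dedup only runs from the
-- second level on; B returns each distinct word once, as the function's purpose (and
-- A's own behaviour at every other length) intends.
def D_get_wordlist_of_all_possible_words (characters : String) (length_of_words : Int) : Prop :=
  length_of_words = 1 ∧ ¬ (PySem.Str.lower characters).toList.Nodup
instance (characters : String) (length_of_words : Int) : Decidable (D_get_wordlist_of_all_possible_words characters length_of_words) := by unfold D_get_wordlist_of_all_possible_words; infer_instance

def Spec_get_wordlist_of_all_possible_words (characters : String) (length_of_words : Int) (out : List String) : Prop := ¬ D_get_wordlist_of_all_possible_words characters length_of_words → out = get_wordlist_of_all_possible_words_alt characters length_of_words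
instance (characters : String) (length_of_words : Int) (out : List String) : Decidable (Spec_get_wordlist_of_all_possible_words characters length_of_words out) := by unfold Spec_get_wordlist_of_all_possible_words; infer_instance

def pvDiffWitness_get_wordlist_of_all_possible_words : String × Int := ("aa", 1)
def pvDiffWitnessOut_get_wordlist_of_all_possible_words : (List String) × (List String) := (["a", "a"], ["a"])

-- ===== CLAIM (what is proved, stated in full; the proofs are below) =====
def Claim_unchanged_get_wordlist_of_all_possible_words : Prop := ∀ (characters : String) (length_of_words : Int), Dom_get_wordlist_of_all_possible_words characters length_of_words → Pre_get_wordlist_of_all_possible_words characters length_of_words → Spec_get_wordlist_of_all_possible_words characters length_of_words (get_wordlist_of_all_possible_words characters length_of_words)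
def Claim_changed_get_wordlist_of_all_possible_words : Prop := Dom_get_wordlist_of_all_possible_words (pvDiffWitness_get_wordlist_of_all_possible_words.1) (pvDiffWitness_get_wordlist_of_all_possible_words.2) ∧ Pre_get_wordlist_of_all_possible_words (pvDiffWitness_get_wordlist_of_all_possible_words.1) (pvDiffWitness_get_wordlist_of_all_possible_words.2) ∧ D_get_wordlist_of_all_possible_words (pvDiffWitness_get_wordlist_of_all_possible_words.1) (pvDiffWitness_get_wordlist_of_all_possible_words.2) ∧ get_wordlist_of_all_possible_words (pvDiffWitness_get_wordlist_of_all_possible_words.1) (pvDiffWitness_get_wordlist_of_all_possible_words.2) = pvDiffWitnessOut_get_wordlist_of_all_possible_words.1 ∧ get_wordlist_of_all_possible_words_alt (pvDiffWitness_get_wordlist_of_all_possible_words.1) (pvDiffWitness_get_wordlist_of_all_possible_words.2) = pvDiffWitnessOut_get_wordlist_of_all_possible_words.2 ∧ pvDiffWitnessOut_get_wordlist_of_all_possible_words.1 ≠ pvDiffWitnessOut_get_wordlist_of_all_possible_words.2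
def Claim_exact_get_wordlist_of_all_possible_words : Prop := ∀ (characters : String) (length_of_words : Int), Dom_get_wordlist_of_all_possible_words characters length_of_words → Pre_get_wordlist_of_all_possible_words characters length_of_words → D_get_wordlist_of_all_possible_words characters length_of_words → get_wordlist_of_all_possible_words characters length_of_words ≠ get_wordlist_of_all_possible_words_alt characters length_of_words

-- ===== LEMMAS AND PROOFS =====

-- extensions of a prefix p by the distinct valid characters, in first-occurrence order
def pvExt (cs : List Char) (p : String) : List String :=
  (((PySem.Dict.counter cs).keys).filter
      (fun c => (PySem.Str.count p (String.ofList [c]) : Int) < (PySem.Dict.counter cs).getD c 0)).map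
    (fun c => p ++ String.ofList [c])

abbrev pvValid (cs : List Char) (p : String) (c : Char) : Prop :=
  (PySem.Str.count p (String.ofList [c]) : Int) < (PySem.Dict.counter cs).getD c 0

-- A's occurrence dict IS Counter(characters)
theorem pvOccA_eq_counter (cs : List Char) : pvOccA cs = PySem.Dict.counter cs := by
  have hstep : ∀ (d : PySem.Dict Char Int) (c : Char),
      (if d.contains c = false then d.insert c 1 else d.modify c 0 (· + 1)) = d.modify c 0 (· + 1) := by
    intro d c
    by_cases hc : d.contains c = false
    · simp [hc, PySem.Dict.insert, PySem.Dict.modify, PySem.Dict.getD_of_not_contains d 0 hc]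
    · simp [hc]
  rw [PySem.Dict.counter_eq_foldl]
  unfold pvOccA
  simp only [hstep]

theorem pvCountsB_eq_counter (cs : List Char) : pvCountsB cs = PySem.Dict.counter cs := by
  exact PySem.Dict.foldl_insert_getD_add_one_eq_counter cs

-- same-prefix injectivity of p ++ c
theorem pvAppend_inj_right (p : String) (c c' : Char)
    (h : p ++ String.ofList [c] = p ++ String.ofList [c']) : c = c' := by
  have := congrArg String.toList h
  simp at this
  exact this

-- equal-length-prefix injectivity
theorem pvAppend_inj (p q : String) (c c' : Char) (hl : p.toList.length = q.toList.length)
    (h : p ++ String.ofList [c] = q ++ String.ofList [c']) : p = q ∧ c = c' := by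
  have h2 := congrArg String.toList h
  simp at h2
  refine ⟨?_, h2.2⟩
  calc p = String.ofList p.toList := by simp
    _ = String.ofList q.toList := by rw [h2.1]
    _ = q := by simp

-- filter and first-occurrence dedup commute
theorem pvOfList_filter (q : Char → Bool) (cs : List Char) :
    PySem.Set.ofList (cs.filter q) = (PySem.Set.ofList cs).filter q := by
  have hadd : ∀ (s : List Char) (c : Char), q c = true →
      PySem.Set.add (s.filter q) c = (PySem.Set.add s c).filter q := by
    intro s c hq
    by_cases hm : c ∈ s
    · simp [PySem.Set.add, PySem.Set.contains_iff, hm, List.mem_filter, hq]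
    · simp [PySem.Set.add, PySem.Set.contains_iff, hm, List.mem_filter, hq,
            List.filter_append, List.filter_cons]
  have haddn : ∀ (s : List Char) (c : Char), q c = false →
      (PySem.Set.add s c).filter q = s.filter q := by
    intro s c hq
    by_cases hm : c ∈ s
    · simp [PySem.Set.add, PySem.Set.contains_iff, hm]
    · simp [PySem.Set.add, PySem.Set.contains_iff, hm, List.filter_append,
            List.filter_cons, hq]
  have key : ∀ (cs : List Char) (s : List Char),
      (cs.filter q).foldl PySem.Set.add (s.filter q) = (cs.foldl PySem.Set.add s).filter q := by
    intro cs
    induction cs with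
    | nil => intro s; rfl
    | cons c t ih =>
      intro s
      rcases hq : q c with _ | _
      · rw [List.filter_cons, if_neg (by simp [hq]), List.foldl_cons, ← haddn s c hq]
        exact ih (PySem.Set.add s c)
      · rw [List.filter_cons, if_pos (by simp [hq]), List.foldl_cons, List.foldl_cons,
            hadd s c hq, ih]
  have := key cs []
  simpa [PySem.Set.ofList_eq_foldl] using this

-- ofList of an injectively mapped list is the mapped ofList
theorem pvOfList_map_single (cs : List Char) :
    PySem.Set.ofList (cs.map (fun c => String.ofList [c]))
      = (PySem.Set.ofList cs).map (fun c => String.ofList [c]) := by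
  induction cs using List.reverseRecOn with
  | nil => rfl
  | append_singleton t x ih =>
    rw [List.map_append, List.map_singleton, PySem.Set.ofList_append_singleton,
        PySem.Set.ofList_append_singleton, ih]
    by_cases hm : x ∈ PySem.Set.ofList t
    · rw [PySem.Set.add_of_mem hm, PySem.Set.add_of_mem (List.mem_map.mpr ⟨x, hm, rfl⟩)]
    · rw [PySem.Set.add_of_not_mem hm, PySem.Set.add_of_not_mem, List.map_append,
          List.map_singleton]
      intro hc
      obtain ⟨c, hc1, hc2⟩ := List.mem_map.mp hc
      have : c = x := by
        have := congrArg String.toList hc2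
        simpa using this
      exact hm (this ▸ hc1)

-- ofList is a sublist of its argument
theorem pvOfList_sublist (cs : List Char) : (PySem.Set.ofList cs).Sublist cs := by
  induction cs using List.reverseRecOn with
  | nil => simp
  | append_singleton t x ih =>
    rw [PySem.Set.ofList_append_singleton]
    by_cases hm : x ∈ PySem.Set.ofList t
    · rw [PySem.Set.add_of_mem hm]
      exact ih.trans (List.sublist_append_left t [x])
    · rw [PySem.Set.add_of_not_mem hm]
      exact List.Sublist.append ih (List.Sublist.refl [x])

-- a repeated prefix contributes nothing: all its extensions are already in r
theorem pvInnerA_of_subset (cs0 cs : List Char) (p : String) (r : List String)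
    (h : ∀ c ∈ cs, pvValid cs0 p c → (p ++ String.ofList [c]) ∈ r) :
    pvInnerA cs (PySem.Dict.counter cs0) p r = r := by
  unfold pvInnerA
  induction cs with
  | nil => rfl
  | cons j t ih =>
    rw [List.foldl_cons]
    have hcond : ¬ ((PySem.Str.count p (String.ofList [j]) : Int) < (PySem.Dict.counter cs0).getD j 0
        ∧ (p ++ String.ofList [j]) ∉ r) := by
      rintro ⟨hv, hnm⟩
      exact hnm (h j (by simp) hv)
    rw [if_neg hcond]
    exact ih (fun c hc hv => h c (by simp [hc]) hv)

-- a fresh prefix appends exactly its extensions by the distinct valid characters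
theorem pvInnerA_fresh (cs0 cs : List Char) (p : String) (r0 : List String) (S : List Char)
    (hfresh : ∀ c : Char, (p ++ String.ofList [c]) ∉ r0) :
    pvInnerA cs (PySem.Dict.counter cs0) p (r0 ++ S.map (fun c => p ++ String.ofList [c]))
      = r0 ++ (cs.foldl (fun s c => if pvValid cs0 p c ∧ c ∉ s then s ++ [c] else s) S).map
          (fun c => p ++ String.ofList [c]) := by
  unfold pvInnerA
  induction cs generalizing S with
  | nil => rfl
  | cons j t ih =>
    rw [List.foldl_cons]
    have hmem : (p ++ String.ofList [j]) ∈ (r0 ++ S.map (fun c => p ++ String.ofList [c])) ↔ j ∈ S := by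
      constructor
      · intro hm
        rcases List.mem_append.mp hm with hm | hm
        · exact absurd hm (hfresh j)
        · obtain ⟨c, hc, he⟩ := List.mem_map.mp hm
          rwa [pvAppend_inj_right p c j he] at hc
      · intro hm
        exact List.mem_append.mpr (Or.inr (List.mem_map.mpr ⟨j, hm, rfl⟩))
    rw [List.foldl_cons]
    by_cases hc : pvValid cs0 p j ∧ j ∉ S
    · rw [if_pos ⟨hc.1, fun hm => hc.2 (hmem.mp hm)⟩, if_pos hc]
      have : r0 ++ S.map (fun c => p ++ String.ofList [c]) ++ [p ++ String.ofList [j]]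
          = r0 ++ (S ++ [j]).map (fun c => p ++ String.ofList [c]) := by
        simp
      rw [this]
      exact ih (S ++ [j])
    · rw [if_neg (by rintro ⟨hv, hnm⟩; exact hc ⟨hv, fun hm => hnm (hmem.mpr hm)⟩), if_neg hc]
      exact ih S

-- the inner char fold is Set.ofList of the valid characters
theorem pvCharFold_eq (cs0 cs : List Char) (p : String) (S : List Char) :
    cs.foldl (fun s c => if pvValid cs0 p c ∧ c ∉ s then s ++ [c] else s) S
      = (cs.filter (fun c => decide (pvValid cs0 p c))).foldl PySem.Set.add S := by
  induction cs generalizing S with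
  | nil => rfl
  | cons c t ih =>
    by_cases hv : pvValid cs0 p c
    · have hfil : List.filter (fun x => decide (pvValid cs0 p x)) (c :: t)
          = c :: List.filter (fun x => decide (pvValid cs0 p x)) t := by
        simp [List.filter_cons]
        simpa [pvValid, PySem.Dict.getD_counter] using hv
      rw [List.foldl_cons, hfil, List.foldl_cons]
      by_cases hm : c ∈ S
      · rw [if_neg (by rintro ⟨_, h⟩; exact h hm),
            show PySem.Set.add S c = S by simp [PySem.Set.add, PySem.Set.contains_iff, hm]]
        exact ih S
      · rw [if_pos ⟨hv, hm⟩,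
            show PySem.Set.add S c = S ++ [c] by simp [PySem.Set.add, PySem.Set.contains_iff, hm]]
        exact ih (S ++ [c])
    · have hfil : List.filter (fun x => decide (pvValid cs0 p x)) (c :: t)
          = List.filter (fun x => decide (pvValid cs0 p x)) t := by
        simp [List.filter_cons]
        simpa [pvValid, PySem.Dict.getD_counter] using hv
      rw [List.foldl_cons, hfil, if_neg (by rintro ⟨h, _⟩; exact hv h)]
      exact ih S

-- one level of A: the dedup'd prefixes, each extended by its distinct valid characters
theorem pvStepA_fold (cs : List Char) (m : Nat) (wl seen : List String)
    (hwl : ∀ w ∈ wl, w.toList.length = m) (hseen : ∀ w ∈ seen, w.toList.length = m) :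
    wl.foldl (fun racc value => pvInnerA cs (PySem.Dict.counter cs) value racc)
        (seen.flatMap (pvExt cs))
      = (wl.foldl PySem.Set.add seen).flatMap (pvExt cs) := by
  induction wl generalizing seen with
  | nil => rfl
  | cons w t ih =>
    rw [List.foldl_cons, List.foldl_cons]
    by_cases hm : w ∈ seen
    · have h1 : pvInnerA cs (PySem.Dict.counter cs) w (seen.flatMap (pvExt cs))
          = seen.flatMap (pvExt cs) := by
        apply pvInnerA_of_subset
        intro c hc hv
        refine List.mem_flatMap.mpr ⟨w, hm, ?_⟩
        unfold pvExt
        refine List.mem_map.mpr ⟨c, ?_, rfl⟩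
        refine List.mem_filter.mpr ⟨?_, by simpa [pvValid] using hv⟩
        rw [PySem.Dict.keys_counter]
        exact (PySem.Set.mem_ofList _ _).mpr hc
      have h2 : PySem.Set.add seen w = seen := by
        simp [PySem.Set.add, PySem.Set.contains_iff, hm]
      rw [h1, h2]
      exact ih seen (fun x hx => hwl x (by simp [hx])) hseen
    · have hfresh : ∀ c : Char, (w ++ String.ofList [c]) ∉ seen.flatMap (pvExt cs) := by
        intro c hin
        obtain ⟨w', hw', hin2⟩ := List.mem_flatMap.mp hin
        unfold pvExt at hin2
        obtain ⟨c', _, he⟩ := List.mem_map.mp hin2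
        have hl : w'.toList.length = w.toList.length := by
          rw [hseen w' hw', hwl w (by simp)]
        obtain ⟨hwe, _⟩ := pvAppend_inj w' w c' c hl he
        exact hm (hwe ▸ hw')
      have h1 := pvInnerA_fresh cs cs w (seen.flatMap (pvExt cs)) [] hfresh
      rw [show seen.flatMap (pvExt cs) ++ ([] : List Char).map (fun c => w ++ String.ofList [c])
            = seen.flatMap (pvExt cs) by simp] at h1
      rw [h1, pvCharFold_eq]
      have hext : ((cs.filter (fun c => decide (pvValid cs w c))).foldl PySem.Set.add []).map
            (fun c => w ++ String.ofList [c]) = pvExt cs w := by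
        rw [← PySem.Set.ofList_eq_foldl, pvOfList_filter]
        unfold pvExt
        rw [PySem.Dict.keys_counter]
      rw [hext]
      have h2 : PySem.Set.add seen w = seen ++ [w] := by
        simp [PySem.Set.add, PySem.Set.contains_iff, hm]
      rw [h2, show seen.flatMap (pvExt cs) ++ pvExt cs w = (seen ++ [w]).flatMap (pvExt cs) by simp]
      apply ih
      · intro x hx; exact hwl x (by simp [hx])
      · intro x hx
        rcases List.mem_append.mp hx with hx | hx
        · exact hseen x hx
        · simp at hx; subst hx; exact hwl x (by simp)

theorem pvStepA_eq (cs : List Char) (m : Nat) (wl : List String)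
    (hwl : ∀ w ∈ wl, w.toList.length = m) :
    pvStepA cs (PySem.Dict.counter cs) wl = (PySem.Set.ofList wl).flatMap (pvExt cs) := by
  unfold pvStepA
  have h := pvStepA_fold cs m wl [] hwl (by intro w hw; simp at hw)
  simp only [List.flatMap_nil] at h
  rw [h, PySem.Set.ofList_eq_foldl]

-- every word of a step has length m + 1
theorem pvExt_len (cs : List Char) (m : Nat) (wl : List String)
    (hwl : ∀ w ∈ wl, w.toList.length = m) :
    ∀ w ∈ wl.flatMap (pvExt cs), w.toList.length = m + 1 := by
  intro w hw
  obtain ⟨p, hp, hw2⟩ := List.mem_flatMap.mp hw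
  obtain ⟨c, _, he⟩ := List.mem_map.mp hw2
  rw [← he]
  simp [hwl p hp]

-- a step of distinct equal-length prefixes is duplicate-free
theorem pvExt_self_nodup (cs : List Char) (p : String) : (pvExt cs p).Nodup := by
  unfold pvExt
  apply List.Nodup.map_on
  · intro c _ c' _ h
    exact pvAppend_inj_right p c c' h
  · exact List.Nodup.filter _ (PySem.Dict.nodup_keys_counter cs)

theorem pvExt_mem_shape (cs : List Char) (p x : String) (hx : x ∈ pvExt cs p) :
    ∃ c, x = p ++ String.ofList [c] := by
  unfold pvExt at hx
  obtain ⟨c, _, he⟩ := List.mem_map.mp hx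
  exact ⟨c, he.symm⟩

theorem pvExt_nodup (cs : List Char) (m : Nat) (wl : List String)
    (hwl : ∀ w ∈ wl, w.toList.length = m) (hnd : wl.Nodup) :
    (wl.flatMap (pvExt cs)).Nodup := by
  induction wl with
  | nil => simp
  | cons w t ih =>
    rw [List.flatMap_cons]
    apply List.Nodup.append
    · exact pvExt_self_nodup cs w
    · exact ih (fun x hx => hwl x (by simp [hx])) (List.Nodup.of_cons hnd)
    · intro x hx hx'
      obtain ⟨w', hw', hx2⟩ := List.mem_flatMap.mp hx'
      obtain ⟨c, hc⟩ := pvExt_mem_shape cs w x hx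
      obtain ⟨c', hc'⟩ := pvExt_mem_shape cs w' x hx2
      have hl : w.toList.length = w'.toList.length := by
        rw [hwl w (by simp), hwl w' (by simp [hw'])]
      obtain ⟨hww, _⟩ := pvAppend_inj w w' c c' hl (hc.symm.trans hc')
      have : w ∉ t := (List.nodup_cons.mp hnd).1
      exact this (hww ▸ hw')

-- unfolding B one level: extend by the valid characters, then recurse
theorem pvBuildB_succ (cs : List Char) (p : String) (n : Nat) :
    pvBuildB (PySem.Dict.counter cs) p (n+1)
      = (pvExt cs p).flatMap (fun q => pvBuildB (PySem.Dict.counter cs) q n) := by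
  show _ = ((((PySem.Dict.counter cs).keys).filter _).map _).flatMap _
  rw [List.flatMap_map]
  rfl

-- BFS (A's iteration) from a duplicate-free level equals DFS (B's recursion)
theorem pvIterA_eq_build (cs : List Char) (n : Nat) (m : Nat) (wl : List String)
    (hwl : ∀ w ∈ wl, w.toList.length = m) (hnd : wl.Nodup) :
    pvIterA cs (PySem.Dict.counter cs) wl n
      = wl.flatMap (fun p => pvBuildB (PySem.Dict.counter cs) p n) := by
  induction n generalizing wl m with
  | zero => simp [pvIterA, pvBuildB, List.flatMap_singleton']
  | succ k ih =>
    show pvIterA cs (PySem.Dict.counter cs) (pvStepA cs (PySem.Dict.counter cs) wl) k = _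
    rw [pvStepA_eq cs m wl hwl, PySem.Set.ofList_eq_self_of_nodup wl hnd]
    rw [ih (m+1) (wl.flatMap (pvExt cs)) (pvExt_len cs m wl hwl) (pvExt_nodup cs m wl hwl hnd)]
    rw [List.flatMap_assoc]
    exact List.flatMap_congr (fun p _ => (pvBuildB_succ cs p k).symm)

-- the empty prefix is extended by exactly the distinct characters
theorem pvExt_empty (cs : List Char) :
    pvExt cs "" = (PySem.Set.ofList cs).map (fun c => String.ofList [c]) := by
  unfold pvExt
  rw [PySem.Dict.keys_counter]
  congr 1
  apply List.filter_eq_self.mpr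
  intro c hc
  have hmem : c ∈ cs := (PySem.Set.mem_ofList _ _).mp hc
  have hpos : 0 < cs.count c := List.count_pos_iff.mpr hmem
  have hcnt : PySem.Str.count "" (String.ofList [c]) = 0 := by
    simp [PySem.Str.count, PySem.Chars.count, PySem.Chars.count.go]
  rw [PySem.Dict.getD_counter]
  simp only [hcnt]
  exact decide_eq_true (by exact_mod_cast hpos)

-- ===== VERDICT (by name: the statement is the Claim_ definition above) =====
-- words of level 1 all have length 1
theorem pvLevel1_len (cs : List Char) :
    ∀ w ∈ cs.map (fun i => String.ofList [i]), w.toList.length = 1 := by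
  intro w hw
  obtain ⟨c, _, he⟩ := List.mem_map.mp hw
  simp [← he]

theorem pvStart_nodup (cs : List Char) :
    ((PySem.Set.ofList cs).map (fun c => String.ofList [c])).Nodup := by
  apply List.Nodup.map_on
  · intro c _ c' _ h
    have := congrArg String.toList h
    simpa using this
  · exact PySem.Set.nodup_ofList cs

-- ===== VERDICT (by name: the statement is the Claim_ definition above) =====
theorem get_wordlist_of_all_possible_words_spec : Claim_unchanged_get_wordlist_of_all_possible_words := by
  intro characters length_of_words _ hpre
  unfold Spec_get_wordlist_of_all_possible_words
  intro hnD
  unfold get_wordlist_of_all_possible_words get_wordlist_of_all_possible_words_alt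
  simp only [pvOccA_eq_counter, pvCountsB_eq_counter]
  set cs := (PySem.Str.lower characters).toList with hcs
  by_cases h0 : length_of_words = 0
  · simp [h0]
  · have hpos : 0 < length_of_words := lt_of_le_of_ne hpre (Ne.symm h0)
    rw [if_neg h0, if_neg (by omega)]
    have htn : length_of_words.toNat = (length_of_words - 1).toNat + 1 := by omega
    rw [htn, pvBuildB_succ, pvExt_empty]
    rcases hn : (length_of_words - 1).toNat with _ | k
    · -- length_of_words = 1: cs has no duplicates (¬ D_)
      have h1 : length_of_words = 1 := by omega
      have hnodup : cs.Nodup := by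
        by_contra hdup
        exact hnD ⟨h1, hdup⟩
      rw [PySem.Set.ofList_eq_self_of_nodup cs hnodup]
      show cs.map (fun i => String.ofList [i])
        = (cs.map (fun c => String.ofList [c])).flatMap (fun q => [q])
      rw [List.flatMap_singleton']
    · -- length_of_words ≥ 2: the first step dedups level 1
      show pvIterA cs (PySem.Dict.counter cs)
          (pvStepA cs (PySem.Dict.counter cs) (cs.map (fun i => String.ofList [i]))) k = _
      have hstep : pvStepA cs (PySem.Dict.counter cs) (cs.map (fun i => String.ofList [i]))
          = pvStepA cs (PySem.Dict.counter cs)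
              ((PySem.Set.ofList cs).map (fun c => String.ofList [c])) := by
        rw [pvStepA_eq cs 1 _ (pvLevel1_len cs), pvOfList_map_single,
            pvStepA_eq cs 1 _ (fun w hw => by
              obtain ⟨c, _, he⟩ := List.mem_map.mp hw; simp [← he]),
            PySem.Set.ofList_eq_self_of_nodup _ (pvStart_nodup cs)]
      rw [hstep]
      exact pvIterA_eq_build cs (k+1) 1 _ (fun w hw => by
        obtain ⟨c, _, he⟩ := List.mem_map.mp hw; simp [← he]) (pvStart_nodup cs)

theorem get_wordlist_of_all_possible_words_changed : Claim_changed_get_wordlist_of_all_possible_words := by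
  unfold Claim_changed_get_wordlist_of_all_possible_words; decide

theorem get_wordlist_of_all_possible_words_tight : Claim_exact_get_wordlist_of_all_possible_words := by
  intro characters length_of_words _ _ hD heq
  obtain ⟨h1, hdup⟩ := hD
  set cs := (PySem.Str.lower characters).toList with hcs
  have hA : get_wordlist_of_all_possible_words characters length_of_words
      = cs.map (fun i => String.ofList [i]) := by
    unfold get_wordlist_of_all_possible_words
    rw [h1]
    norm_num [pvIterA]
    simp [hcs]
  have hB : get_wordlist_of_all_possible_words_alt characters length_of_words
      = (PySem.Set.ofList cs).map (fun c => String.ofList [c]) := by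
    unfold get_wordlist_of_all_possible_words_alt
    rw [h1]
    rw [if_neg (by omega), pvCountsB_eq_counter]
    show pvBuildB (PySem.Dict.counter cs) "" (1 : Int).toNat = _
    rw [show ((1 : Int).toNat) = 0 + 1 from rfl, pvBuildB_succ, pvExt_empty]
    simp [pvBuildB]
  rw [hA, hB] at heq
  have hlen := congrArg List.length heq
  simp only [List.length_map] at hlen
  have := List.Sublist.eq_of_length (pvOfList_sublist cs) hlen.symm
  exact hdup (this ▸ PySem.Set.nodup_ofList cs)
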